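-- pv_equiv track=rewrite | github.com/nehuengonzalez/av_aware2017 | kpaths.py | _elabels_expansion
-- ===== SOURCE A (Python) =====
-- EPATH_LBL = 0
--
-- FORWARD = 0
--
-- BACKWARD = 1
--
-- def _elabels_expansion(labels):
--
--     if not labels:
--         return []
--
--     elif len(labels) == 1:
--         if labels[0][0] == EPATH_LBL:
--             return [[(EPATH_LBL, labels[0][1], FORWARD)]
--                     ,[(EPATH_LBL, labels[0][1], BACKWARD)]]
--         else:
--             return [labels]
--
--     elif labels[0][0] == EPATH_LBL:
--         ret_n = _elabels_expansion(labels[1:])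
--         return ([[(EPATH_LBL, labels[0][1], FORWARD)]
--                    + ret_i for ret_i in ret_n]
--                 + [[(EPATH_LBL, labels[0][1], BACKWARD)]
--                    + ret_i for ret_i in ret_n])
--     else:
--         ret_n = _elabels_expansion(labels[1:])
--         return [[labels[0]] + ret_i for ret_i in ret_n]
-- ===== SOURCE B (Python) =====
-- EPATH_LBL = 0
--
-- FORWARD = 0
--
-- BACKWARD = 1
--
-- def _elabels_expansion(labels):
--     if not labels:
--         return []
--     result = [[]]
--     for label in labels:
--         if label[0] == EPATH_LBL:
--             choices = [(EPATH_LBL, label[1], FORWARD), (EPATH_LBL, label[1], BACKWARD)]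
--         else:
--             choices = [label]
--         result = [p + [c] for p in result for c in choices]
--     return result
-- ===== Notes on version B (the rewrite author's own statement) =====
-- stated objective: simpler
-- what changed: Replaced the branching recursion on the list tail by a single iterative Cartesian-product build: a fold over the labels extends every partial path with that label's choice list (forward before backward for EPATH labels), appending at the end instead of prepending recursively.
import Mathlib
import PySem

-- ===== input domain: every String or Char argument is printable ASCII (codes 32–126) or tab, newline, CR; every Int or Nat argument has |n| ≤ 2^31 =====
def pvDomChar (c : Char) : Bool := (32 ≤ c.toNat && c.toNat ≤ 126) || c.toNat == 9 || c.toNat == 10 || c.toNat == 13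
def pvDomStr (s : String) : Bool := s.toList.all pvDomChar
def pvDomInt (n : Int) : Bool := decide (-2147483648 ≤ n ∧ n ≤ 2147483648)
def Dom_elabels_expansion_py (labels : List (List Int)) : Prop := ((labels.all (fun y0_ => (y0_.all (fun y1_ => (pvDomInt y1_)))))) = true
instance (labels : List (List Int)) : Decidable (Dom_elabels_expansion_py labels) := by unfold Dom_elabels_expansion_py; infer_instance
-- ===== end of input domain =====

-- B replaces A's branching tail recursion by an iterative left-to-right Cartesian-product build (simpler decomposition, same result order).


-- ===== PORT A =====
-- Literal port of A's recursion: empty case, singleton case, then cons case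
-- with forward-block ++ backward-block (EPATH) or plain prepend (other).
-- labels[0][0] / labels[0][1] are total here via headD/getD; Pre_ below excludes
-- exactly the inputs where the Python indexing raises.
def elabels_expansion_py : List (List Int) → List (List (List Int))
  | [] => []
  | [l] =>
    if l.headD 1 = 0 then
      [[[0, l.getD 1 0, 0]], [[0, l.getD 1 0, 1]]]
    else [[l]]
  | l :: rest =>
    if l.headD 1 = 0 then
      let ret_n := elabels_expansion_py rest
      (ret_n.map (fun ret_i => [0, l.getD 1 0, 0] :: ret_i))
        ++ (ret_n.map (fun ret_i => [0, l.getD 1 0, 1] :: ret_i))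
    else
      let ret_n := elabels_expansion_py rest
      ret_n.map (fun ret_i => l :: ret_i)

-- ===== PORT B =====
-- Port of Source B: guard the empty case, then fold over labels extending each
-- partial path with that label's choice list (forward before backward).
def elabels_expansion_py_alt (labels : List (List Int)) : List (List (List Int)) :=
  if labels = [] then []
  else
    labels.foldl
      (fun result label =>
        let choices :=
          if label.headD 1 = 0 then
            [[0, label.getD 1 0, 0], [0, label.getD 1 0, 1]]
          else [label]
        result.flatMap (fun p => choices.map (fun c => p ++ [c])))
      [[]]

-- ===== PRECONDITION & SPEC =====
-- Pre_ excludes exactly the inputs on which Python A raises IndexError: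
-- a label that is the empty list, or an EPATH label (head 0) of length < 2.
def Pre_elabels_expansion_py (labels : List (List Int)) : Prop :=
  (labels.all (fun l => !l.isEmpty && (l.headD 1 != 0 || 2 ≤ l.length))) = true
instance (labels : List (List Int)) : Decidable (Pre_elabels_expansion_py labels) := by
  unfold Pre_elabels_expansion_py; infer_instance
def pvWitness_elabels_expansion_py : List (List Int) := [[0, 7], [3, 4], [0, 5]]
def Spec_elabels_expansion_py (labels : List (List Int)) (out : List (List (List Int))) : Prop := out = elabels_expansion_py_alt labels
instance (labels : List (List Int)) (out : List (List (List Int))) : Decidable (Spec_elabels_expansion_py labels out) := by unfold Spec_elabels_expansion_py; infer_instance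

-- ===== CLAIM (what is proved, stated in full; the proofs are below) =====
def Claim_equal_elabels_expansion_py : Prop := ∀ (labels : List (List Int)), Dom_elabels_expansion_py labels → Pre_elabels_expansion_py labels → Spec_elabels_expansion_py labels (elabels_expansion_py labels)

-- ===== LEMMAS AND PROOFS =====

-- a label's choice list
def pvChoices (l : List Int) : List (List Int) :=
  if l.headD 1 = 0 then [[0, l.getD 1 0, 0], [0, l.getD 1 0, 1]] else [l]

-- the common product form: prepend-style expansion, empty list ↦ [[]]
def pvProd : List (List Int) → List (List (List Int))
  | [] => [[]]
  | l :: rest => (pvChoices l).flatMap (fun c => (pvProd rest).map (fun r => c :: r))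

theorem portA_eq_pvProd (labels : List (List Int)) (h : labels ≠ []) :
    elabels_expansion_py labels = pvProd labels := by
  induction labels with
  | nil => exact absurd rfl h
  | cons l rest ih =>
    cases rest with
    | nil =>
      simp only [elabels_expansion_py, pvProd, pvChoices]
      split <;> simp
    | cons l2 rest2 =>
      simp only [elabels_expansion_py]
      rw [ih (by simp)]
      conv_rhs => rw [pvProd]
      simp only [pvChoices]
      split <;> simp [List.flatMap]

theorem foldl_step_eq (labels : List (List Int)) (acc : List (List (List Int))) :
    labels.foldl
      (fun result label =>
        let choices :=
          if label.headD 1 = 0 then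
            [[0, label.getD 1 0, 0], [0, label.getD 1 0, 1]]
          else [label]
        result.flatMap (fun p => choices.map (fun c => p ++ [c])))
      acc
    = acc.flatMap (fun p => (pvProd labels).map (fun r => p ++ r)) := by
  induction labels generalizing acc with
  | nil => simp [pvProd]
  | cons l rest ih =>
    simp only [List.foldl_cons, ih]
    conv_rhs => rw [pvProd]
    simp only [pvChoices, List.flatMap_assoc, List.map_flatMap, List.flatMap_map, List.map_map]
    simp [Function.comp_def]

theorem portB_eq_pvProd (labels : List (List Int)) (h : labels ≠ []) :
    elabels_expansion_py_alt labels = pvProd labels := by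
  simp only [elabels_expansion_py_alt, if_neg h, foldl_step_eq]
  simp

-- ===== VERDICT (by name: the statement is the Claim_ definition above) =====
theorem elabels_expansion_py_spec : Claim_equal_elabels_expansion_py := by
  intro labels _ _
  unfold Spec_elabels_expansion_py
  cases labels with
  | nil => rfl
  | cons l rest =>
    rw [portA_eq_pvProd _ (by simp), portB_eq_pvProd _ (by simp)]
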